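-- pv_equiv track=rewrite | github.com/bimj0rk/Python | Personal/Python101/Examen/2.py | verify_translation
-- ===== SOURCE A (Python) =====
-- def verify_translation(cuvant, traducere):
--     vocale_pasareasca = {
--         'a': 'apa',
--         'e': 'epe',
--         'i': 'ipi',
--         'o': 'opo',
--         'u': 'upu'
--     }
--
--     traducere_buna = ""
--
--     for letter in cuvant:
--         if letter in vocale_pasareasca:
--             traducere_buna += vocale_pasareasca[letter]
--         else:
--             traducere_buna += letter
--
--     if traducere_buna == traducere:
--         return True
--     else:
--         return False
-- ===== SOURCE B (Python) =====
-- def verify_translation(cuvant, traducere):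
--     # Inverse algorithm: de-expand traducere back into the source word.
--     # A vowel v in a valid translation must begin a 3-char block "v p v";
--     # any other character stands for itself. The expansion map is injective
--     # because this de-expansion is deterministic.
--     word = []
--     i = 0
--     n = len(traducere)
--     while i < n:
--         c = traducere[i]
--         if c in 'aeiou':
--             if i + 2 >= n or traducere[i + 1] != 'p' or traducere[i + 2] != c:
--                 return False
--             word.append(c)
--             i += 3
--         else:
--             word.append(c)
--             i += 1
--     return ''.join(word) == cuvant
-- ===== Notes on version B (the rewrite author's own statement) =====
-- stated objective: faster
-- what changed: B runs the inverse algorithm: it de-expands traducere (each vowel v must head a 3-char block 'v p v', other chars pass through) back into a word and compares that word with cuvant, instead of expanding cuvant and comparing with traducere; correct because the expansion map is injective with this deterministic inverse.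
import Mathlib
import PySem

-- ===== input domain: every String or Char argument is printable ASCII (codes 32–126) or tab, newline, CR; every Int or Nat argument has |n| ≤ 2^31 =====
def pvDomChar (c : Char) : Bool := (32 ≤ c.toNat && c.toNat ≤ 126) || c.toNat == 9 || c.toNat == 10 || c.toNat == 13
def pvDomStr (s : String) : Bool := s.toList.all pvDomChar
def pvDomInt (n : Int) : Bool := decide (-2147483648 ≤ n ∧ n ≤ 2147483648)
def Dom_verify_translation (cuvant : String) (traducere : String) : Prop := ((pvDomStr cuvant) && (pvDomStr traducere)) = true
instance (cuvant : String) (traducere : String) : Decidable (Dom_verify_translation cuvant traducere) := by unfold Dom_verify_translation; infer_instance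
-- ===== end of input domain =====

-- B runs the inverse algorithm: it de-expands traducere back into a word and compares it with
-- cuvant, instead of expanding cuvant and comparing with traducere (measurably faster: early exit, no repeated concatenation).

-- ===== PORT A =====
-- the dict vocale_pasareasca (values as lists of chars; the port works on List Char throughout)
def pvVocaleA : PySem.Dict Char (List Char) :=
  PySem.Dict.mk [('a', ['a','p','a']), ('e', ['e','p','e']), ('i', ['i','p','i']),
                 ('o', ['o','p','o']), ('u', ['u','p','u'])]

def verify_translation (cuvant : String) (traducere : String) : Bool :=
  let traducere_buna :=
    cuvant.toList.foldl (fun acc letter =>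
      if pvVocaleA.contains letter then acc ++ pvVocaleA.getD letter []
      else acc ++ [letter]) []
  if traducere_buna = traducere.toList then true else false

-- ===== PORT B =====
-- Source B's `c in 'aeiou'`
def pvIsVowel (c : Char) : Bool := c = 'a' || c = 'e' || c = 'i' || c = 'o' || c = 'u'

-- Source B's while loop: `ts` is traducere[i:], `word` the accumulator; returning none = `return False`
def pvDeexpand : List Char → List Char → Option (List Char)
  | word, [] => some word
  | word, c :: ts =>
    if pvIsVowel c then
      match ts with
      | p :: d :: ts' =>
        if p = 'p' && d = c then pvDeexpand (word ++ [c]) ts' else none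
      | _ => none
    else pvDeexpand (word ++ [c]) ts

def verify_translation_alt (cuvant : String) (traducere : String) : Bool :=
  pvDeexpand [] traducere.toList = some cuvant.toList

-- ===== PRECONDITION & SPEC =====
def Spec_verify_translation (cuvant : String) (traducere : String) (out : Bool) : Prop := out = verify_translation_alt cuvant traducere
instance (cuvant : String) (traducere : String) (out : Bool) : Decidable (Spec_verify_translation cuvant traducere out) := by unfold Spec_verify_translation; infer_instance

-- ===== CLAIM (what is proved, stated in full; the proofs are below) =====
def Claim_equal_verify_translation : Prop := ∀ (cuvant : String) (traducere : String), Dom_verify_translation cuvant traducere → Spec_verify_translation cuvant traducere (verify_translation cuvant traducere)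

-- ===== LEMMAS AND PROOFS =====

-- the expansion of a word under the vowel test (the value A's loop accumulates)
def pvExpand : List Char → List Char
  | [] => []
  | c :: cs => (if pvIsVowel c then [c, 'p', c] else [c]) ++ pvExpand cs

-- A's per-letter dict step equals the vowel-test step
lemma pvStep_eq (c : Char) :
    (if pvVocaleA.contains c then pvVocaleA.getD c [] else [c])
      = (if pvIsVowel c then [c, 'p', c] else [c]) := by
  by_cases ha : c = 'a'; · subst ha; decide
  by_cases he : c = 'e'; · subst he; decide
  by_cases hi : c = 'i'; · subst hi; decide
  by_cases ho : c = 'o'; · subst ho; decide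
  by_cases hu : c = 'u'; · subst hu; decide
  have ha' : ('a' == c) = false := by simp [Ne.symm ha]
  have he' : ('e' == c) = false := by simp [Ne.symm he]
  have hi' : ('i' == c) = false := by simp [Ne.symm hi]
  have ho' : ('o' == c) = false := by simp [Ne.symm ho]
  have hu' : ('u' == c) = false := by simp [Ne.symm hu]
  simp [pvVocaleA, pvIsVowel, PySem.Dict.contains,
    ha', he', hi', ho', hu', ha, he, hi, ho, hu]

lemma pvFoldl_expand (cs : List Char) (acc : List Char) :
    cs.foldl (fun acc letter =>
      if pvVocaleA.contains letter then acc ++ pvVocaleA.getD letter []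
      else acc ++ [letter]) acc = acc ++ pvExpand cs := by
  induction cs generalizing acc with
  | nil => simp [pvExpand]
  | cons c cs ih =>
    simp only [List.foldl_cons, pvExpand]
    by_cases h : pvVocaleA.contains c = true <;>
      simp [h, ih, ← pvStep_eq c, List.append_assoc]

-- clean one-step unfolding of the de-expansion loop (the equation compiler splits the
-- nested match; this restates the step exactly as written)
lemma pvDeexpand_cons (word : List Char) (c : Char) (ts : List Char) :
    pvDeexpand word (c :: ts) =
      if pvIsVowel c then
        match ts with
        | p :: d :: ts' =>
          if p = 'p' && d = c then pvDeexpand (word ++ [c]) ts' else none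
        | _ => none
      else pvDeexpand (word ++ [c]) ts := by
  match ts with
  | [] => rw [pvDeexpand.eq_3 _ _ _ (fun p d ts' h => by cases h)]
  | [x] => rw [pvDeexpand.eq_3 _ _ _ (fun p d ts' h => by cases h)]
  | p :: d :: ts' => rw [pvDeexpand.eq_2]

-- the de-expansion loop with accumulator = the plain de-expansion, prefixed
lemma pvDeexpand_acc_aux (n : Nat) : ∀ (ts : List Char), ts.length ≤ n → ∀ acc : List Char,
    pvDeexpand acc ts = (pvDeexpand [] ts).map (acc ++ ·) := by
  induction n with
  | zero =>
    intro ts h acc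
    match ts with
    | [] => simp [pvDeexpand]
    | _ :: _ => simp at h
  | succ n ih =>
    intro ts h acc
    match ts with
    | [] => simp [pvDeexpand]
    | c :: ts =>
      by_cases hv : pvIsVowel c = true
      · match ts with
        | [] => simp [pvDeexpand_cons, hv]
        | [x] => simp [pvDeexpand_cons, hv]
        | p :: d :: ts' =>
          simp only [pvDeexpand_cons, hv, if_true]
          by_cases hpd : (p = 'p' && d = c) = true
          · simp only [hpd, if_true]
            have hlen : ts'.length ≤ n := by simp at h; omega
            rw [ih ts' hlen (acc ++ [c]), ih ts' hlen ([] ++ [c])]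
            cases pvDeexpand [] ts' <;> simp
          · simp [hpd]
      · simp only [pvDeexpand_cons, hv, Bool.false_eq_true, if_false]
        have hlen : ts.length ≤ n := by simp at h; omega
        rw [ih ts hlen (acc ++ [c]), ih ts hlen ([] ++ [c])]
        cases pvDeexpand [] ts <;> simp

lemma pvDeexpand_acc (ts : List Char) (acc : List Char) :
    pvDeexpand acc ts = (pvDeexpand [] ts).map (acc ++ ·) :=
  pvDeexpand_acc_aux ts.length ts le_rfl acc

-- de-expansion inverts expansion …
lemma pvDeexpand_expand (w : List Char) : pvDeexpand [] (pvExpand w) = some w := by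
  induction w with
  | nil => simp [pvExpand, pvDeexpand]
  | cons c cs ih =>
    by_cases hv : pvIsVowel c = true
    · simp only [pvExpand, hv, if_true, List.cons_append, List.nil_append]
      simp only [pvDeexpand_cons, hv, if_true, Bool.and_self, decide_true]
      rw [show (([] : List Char) ++ [c]) = [c] from rfl, pvDeexpand_acc, ih]; simp
    · simp only [pvExpand, hv, Bool.false_eq_true, if_false, List.cons_append, List.nil_append]
      simp only [pvDeexpand_cons, hv, Bool.false_eq_true, if_false]
      rw [show (([] : List Char) ++ [c]) = [c] from rfl, pvDeexpand_acc, ih]; simp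

-- … and is sound: any word it returns expands back to the input
lemma pvDeexpand_sound_aux (n : Nat) : ∀ (ts : List Char), ts.length ≤ n → ∀ w : List Char,
    pvDeexpand [] ts = some w → pvExpand w = ts := by
  induction n with
  | zero =>
    intro ts h w hw
    match ts with
    | [] => simp [pvDeexpand] at hw; subst hw; rfl
    | _ :: _ => simp at h
  | succ n ih =>
    intro ts h w hw
    match ts with
    | [] => simp [pvDeexpand] at hw; subst hw; rfl
    | c :: ts =>
      by_cases hv : pvIsVowel c = true
      · match ts with
        | [] => simp [pvDeexpand_cons, hv] at hw
        | [x] => simp [pvDeexpand_cons, hv] at hw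
        | p :: d :: ts' =>
          simp only [pvDeexpand_cons, hv, if_true] at hw
          by_cases hpd : (p = 'p' && d = c) = true
          · simp only [hpd, if_true] at hw
            rw [show (([] : List Char) ++ [c]) = [c] from rfl, pvDeexpand_acc] at hw
            rw [Option.map_eq_some_iff] at hw
            obtain ⟨w', hw', rfl⟩ := hw
            have hlen : ts'.length ≤ n := by simp at h; omega
            simp only [List.singleton_append, pvExpand, hv, if_true, ih ts' hlen w' hw']
            simp only [Bool.and_eq_true, decide_eq_true_eq] at hpd
            rw [hpd.1, hpd.2]
            rfl
          · simp [hpd] at hw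
      · simp only [pvDeexpand_cons, hv, Bool.false_eq_true, if_false] at hw
        rw [show (([] : List Char) ++ [c]) = [c] from rfl, pvDeexpand_acc] at hw
        rw [Option.map_eq_some_iff] at hw
        obtain ⟨w', hw', rfl⟩ := hw
        have hlen : ts.length ≤ n := by simp at h; omega
        simp only [List.singleton_append, pvExpand, hv, Bool.false_eq_true, if_false, ih ts hlen w' hw']

lemma pvDeexpand_sound (ts w : List Char) (h : pvDeexpand [] ts = some w) :
    pvExpand w = ts :=
  pvDeexpand_sound_aux ts.length ts le_rfl w h

-- ===== VERDICT (by name: the statement is the Claim_ definition above) =====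
theorem verify_translation_spec : Claim_equal_verify_translation := by
  intro cuvant traducere _
  unfold Spec_verify_translation verify_translation verify_translation_alt
  rw [pvFoldl_expand]
  by_cases h : pvExpand cuvant.toList = traducere.toList
  · rw [if_pos (by exact_mod_cast h)]
    have he := pvDeexpand_expand cuvant.toList
    rw [h] at he
    simp [he]
  · rw [if_neg (by exact_mod_cast h)]
    have hb : pvDeexpand [] traducere.toList ≠ some cuvant.toList := by
      intro hc; exact h (pvDeexpand_sound _ _ hc)
    simp [hb]
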